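-- pv_equiv track=rewrite | github.com/AmericanPowerAI/mother-brain | advanced_homegrown_ai.py | _parse_bmp_pixels
-- ===== SOURCE A (Python) =====
-- def _parse_bmp_pixels(pixel_data, width, height):
--     """Parse BMP pixel data into RGB arrays"""
--     pixels = []
--     bytes_per_row = width * 3
--
--     for y in range(height):
--         row = []
--         for x in range(width):
--             pixel_offset = y * bytes_per_row + x * 3
--             if pixel_offset + 2 < len(pixel_data):
--                 b = pixel_data[pixel_offset]
--                 g = pixel_data[pixel_offset + 1]
--                 r = pixel_data[pixel_offset + 2]
--                 row.append((r, g, b))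
--             else:
--                 row.append((0, 0, 0))
--         pixels.append(row)
--
--     return pixels
-- ===== SOURCE B (Python) =====
-- def _parse_bmp_pixels(pixel_data, width, height):
--     """Parse BMP pixel data into RGB arrays"""
--     avail = len(pixel_data) // 3
--     flat = [(pixel_data[3 * k + 2], pixel_data[3 * k + 1], pixel_data[3 * k])
--             for k in range(avail)]
--     need = max(width, 0) * max(height, 0)
--     flat = (flat + [(0, 0, 0)] * (need - len(flat)))[:need]
--     return [flat[r * width : r * width + width] for r in range(height)]
-- ===== Notes on version B (the rewrite author's own statement) =====
-- stated objective: alternative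
-- what changed: B replaces A's nested per-pixel loops with per-pixel bound checks by a three-phase pipeline: decode the byte stream once into a flat list of len//3 RGB triples, pad/truncate it to exactly width*height pixels, then reshape into rows by slicing.
import Mathlib
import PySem

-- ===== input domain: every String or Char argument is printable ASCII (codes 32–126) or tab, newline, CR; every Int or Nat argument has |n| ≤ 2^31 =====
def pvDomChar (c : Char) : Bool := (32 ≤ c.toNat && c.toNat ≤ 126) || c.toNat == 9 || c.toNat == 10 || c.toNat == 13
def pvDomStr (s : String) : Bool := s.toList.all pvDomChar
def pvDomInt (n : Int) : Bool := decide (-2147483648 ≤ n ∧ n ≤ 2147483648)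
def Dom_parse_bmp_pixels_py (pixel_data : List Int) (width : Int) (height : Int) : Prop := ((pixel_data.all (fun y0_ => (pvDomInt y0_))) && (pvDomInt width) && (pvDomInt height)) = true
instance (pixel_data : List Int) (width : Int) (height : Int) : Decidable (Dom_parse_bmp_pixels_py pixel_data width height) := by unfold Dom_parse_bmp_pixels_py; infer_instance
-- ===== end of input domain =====

-- B decodes the stream once into a flat pixel list, pads/truncates it to width*height, and reshapes into rows
-- by slicing, instead of A's nested per-pixel loops with a bound check at every pixel (alternative decomposition).

-- ===== PORT A =====
-- literal transliteration of A: nested loops, per-pixel offset and bound check, append into accumulators.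
-- The guard 'pixel_offset + 2 < len' ensures every index Python reads is a valid nonnegative index,
-- so pyGetD's default 0 is unreachable and A never raises.
def parse_bmp_pixels_py (pixel_data : List Int) (width : Int) (height : Int) : List (List (Int × Int × Int)) :=
  let bytes_per_row := width * 3
  (PySem.List.pyRange 0 height 1).foldl (fun pixels y =>
    pixels ++ [(PySem.List.pyRange 0 width 1).foldl (fun row x =>
      let pixel_offset := y * bytes_per_row + x * 3
      if pixel_offset + 2 < (pixel_data.length : Int) then
        row ++ [(PySem.List.pyGetD pixel_data (pixel_offset + 2) 0,
                 PySem.List.pyGetD pixel_data (pixel_offset + 1) 0,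
                 PySem.List.pyGetD pixel_data pixel_offset 0)]
      else
        row ++ [((0 : Int), (0 : Int), (0 : Int))]) []]) []

-- ===== PORT B =====
-- B-side helpers (mirror Source B's expressions; indices 3k, 3k+1, 3k+2 are valid whenever k < len//3)
def pvTriple (pixel_data : List Int) (k : Int) : Int × Int × Int :=
  (PySem.List.pyGetD pixel_data (3 * k + 2) 0,
   PySem.List.pyGetD pixel_data (3 * k + 1) 0,
   PySem.List.pyGetD pixel_data (3 * k) 0)

-- flat = [(d[3k+2], d[3k+1], d[3k]) for k in range(len(d)//3)]
def pvFlat (pixel_data : List Int) : List (Int × Int × Int) :=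
  (PySem.List.pyRange 0 (PySem.Int.floordiv (pixel_data.length : Int) 3) 1).map (pvTriple pixel_data)

-- flat = (flat + [(0,0,0)] * (need - len(flat)))[:need]  with  need = max(width,0)*max(height,0)
def pvPadded (pixel_data : List Int) (width : Int) (height : Int) : List (Int × Int × Int) :=
  let need := max width 0 * max height 0
  PySem.List.slice
    (pvFlat pixel_data ++
      PySem.List.pyRepeat [((0 : Int), (0 : Int), (0 : Int))] (need - ((pvFlat pixel_data).length : Int)))
    none (some need)

-- return [flat[r*width : r*width+width] for r in range(height)]
def parse_bmp_pixels_py_alt (pixel_data : List Int) (width : Int) (height : Int) : List (List (Int × Int × Int)) :=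
  (PySem.List.pyRange 0 height 1).map (fun r =>
    PySem.List.slice (pvPadded pixel_data width height) (some (r * width)) (some (r * width + width)))

-- ===== PRECONDITION & SPEC =====
def Spec_parse_bmp_pixels_py (pixel_data : List Int) (width : Int) (height : Int) (out : List (List (Int × Int × Int))) : Prop := out = parse_bmp_pixels_py_alt pixel_data width height
instance (pixel_data : List Int) (width : Int) (height : Int) (out : List (List (Int × Int × Int))) : Decidable (Spec_parse_bmp_pixels_py pixel_data width height out) := by unfold Spec_parse_bmp_pixels_py; infer_instance

-- ===== CLAIM (what is proved, stated in full; the proofs are below) =====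
def Claim_equal_parse_bmp_pixels_py : Prop := ∀ (pixel_data : List Int) (width : Int) (height : Int), Dom_parse_bmp_pixels_py pixel_data width height → Spec_parse_bmp_pixels_py pixel_data width height (parse_bmp_pixels_py pixel_data width height)

-- ===== LEMMAS AND PROOFS =====

-- the value both programs place at flat pixel index i (row-major)
def pvPix (pixel_data : List Int) (i : Nat) : Int × Int × Int :=
  if 3 * i + 2 < pixel_data.length then
    (pixel_data.getD (3 * i + 2) 0, pixel_data.getD (3 * i + 1) 0, pixel_data.getD (3 * i) 0)
  else ((0 : Int), (0 : Int), (0 : Int))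

lemma pv_floordiv_len (n : Nat) : PySem.Int.floordiv (n : Int) 3 = ((n / 3 : Nat) : Int) := by
  rw [PySem.Int.floordiv, Int.fdiv_eq_ediv]; omega

lemma pv_triple_eq_pix (pd : List Int) (k : Nat) (hk : k < pd.length / 3) :
    pvTriple pd (k : Int) = pvPix pd k := by
  have h2 : 3 * k + 2 < pd.length := by omega
  rw [pvTriple, pvPix, if_pos h2]
  have e2 : (3 * (k : Int) + 2) = ((3 * k + 2 : Nat) : Int) := by push_cast; ring
  have e1 : (3 * (k : Int) + 1) = ((3 * k + 1 : Nat) : Int) := by push_cast; ring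
  have e0 : (3 * (k : Int)) = ((3 * k : Nat) : Int) := by push_cast; ring
  rw [e2, e1, e0, PySem.List.pyGetD_natCast, PySem.List.pyGetD_natCast, PySem.List.pyGetD_natCast]

lemma pv_flat_eq (pd : List Int) :
    pvFlat pd = (List.range (pd.length / 3)).map (pvPix pd) := by
  rw [pvFlat, pv_floordiv_len, PySem.List.pyRange_zero_natCast, List.map_map]
  apply List.map_congr_left
  intro k hk
  rw [List.mem_range] at hk
  exact pv_triple_eq_pix pd k hk

-- the padded flat list is exactly width*height pixels, the i-th being pvPix i
lemma pv_padded_spec (pd : List Int) (w h : Int) (hw : 0 < w) (hh : 0 < h) :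
    pvPadded pd w h = (List.range (w.toNat * h.toNat)).map (pvPix pd) := by
  have hmw : max w 0 = w := by omega
  have hmh : max h 0 = h := by omega
  set A := pd.length / 3 with hA
  set N := w.toNat * h.toNat with hN
  have hneed : max w 0 * max h 0 = (N : Int) := by
    rw [hmw, hmh, hN]; push_cast
    rw [Int.toNat_of_nonneg (by omega), Int.toNat_of_nonneg (by omega)]
  have hlen : (pvFlat pd).length = A := by
    rw [pv_flat_eq, List.length_map, List.length_range]
  rw [pvPadded]
  simp only [hneed, hlen]
  rw [PySem.List.pyRepeat_singleton]
  have hslice := PySem.List.slice_to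
    (pvFlat pd ++ List.replicate ((N : Int) - (A : Int)).toNat ((0 : Int), (0 : Int), (0 : Int)))
    (Int.natCast_nonneg N)
  rw [hslice]
  have htn : ((N : Int) - (A : Int)).toNat = N - A := by omega
  rw [htn, Int.toNat_natCast]
  apply List.ext_getElem
  · simp [hlen]; omega
  · intro i hi1 hi2
    have hiN : i < N := by simpa using hi2
    rw [List.getElem_take, List.getElem_map, List.getElem_range]
    by_cases hiA : i < A
    · rw [List.getElem_append_left (by rw [hlen]; omega)]
      simp only [pv_flat_eq, List.getElem_map, List.getElem_range]
    · rw [List.getElem_append_right (by rw [hlen]; omega), List.getElem_replicate]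
      rw [pvPix, if_neg (by omega)]

lemma pv_padded_nil (pd : List Int) (w h : Int) (hw : w ≤ 0) :
    pvPadded pd w h = [] := by
  rw [pvPadded]
  have hmw : max w 0 = 0 := by omega
  simp only [hmw, zero_mul]
  have hslice := PySem.List.slice_to
    (pvFlat pd ++ PySem.List.pyRepeat [((0:Int),(0:Int),(0:Int))] (0 - ((pvFlat pd).length : Int)))
    (le_refl (0:Int))
  rw [hslice]
  simp

lemma pv_slice_nil (a b : Int) : PySem.List.slice ([] : List (Int × Int × Int)) (some a) (some b) = [] := by
  apply List.eq_nil_of_length_eq_zero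
  rw [PySem.List.length_slice]
  have h1 := PySem.List.clampIdx_le ([] : List (Int × Int × Int)).length a
  have h2 := PySem.List.clampIdx_le ([] : List (Int × Int × Int)).length b
  simp at h1 h2 ⊢
  omega

-- A's pixel at column i of row y equals the flat pixel y*w + i
lemma pv_cell (pd : List Int) (w y : Int) (i : Nat) (hy : 0 ≤ y) (hw : 0 < w) :
    (if y * (w * 3) + (0 + (i : Int)) * 3 + 2 < (pd.length : Int) then
      (PySem.List.pyGetD pd (y * (w * 3) + (0 + (i : Int)) * 3 + 2) 0,
       PySem.List.pyGetD pd (y * (w * 3) + (0 + (i : Int)) * 3 + 1) 0,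
       PySem.List.pyGetD pd (y * (w * 3) + (0 + (i : Int)) * 3) 0)
     else ((0 : Int), (0 : Int), (0 : Int)))
    = pvPix pd (y.toNat * w.toNat + i) := by
  lift y to ℕ using hy with yn
  lift w to ℕ using (le_of_lt hw) with wn
  simp only [Int.toNat_natCast]
  have hm : (yn : Int) * ((wn : Int) * 3) + (0 + (i : Int)) * 3
      = ((3 * (yn * wn + i) : Nat) : Int) := by
    push_cast; ring
  rw [hm, pvPix]
  set m := yn * wn + i with hmdef
  by_cases hc : 3 * m + 2 < pd.length
  · rw [if_pos (by omega), if_pos hc]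
    have e2 : ((3 * m : Nat) : Int) + 2 = ((3 * m + 2 : Nat) : Int) := by push_cast; ring
    have e1 : ((3 * m : Nat) : Int) + 1 = ((3 * m + 1 : Nat) : Int) := by push_cast; ring
    rw [e2, e1, PySem.List.pyGetD_natCast, PySem.List.pyGetD_natCast, PySem.List.pyGetD_natCast]
  · rw [if_neg (by omega), if_neg hc]

-- A's row y equals B's slice [y*w, y*w+w) of the padded flat list
lemma pv_row_eq (pd : List Int) (w h y : Int) (hy0 : 0 ≤ y) (hyh : y < h) :
    (PySem.List.pyRange 0 w 1).map (fun x =>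
      if y * (w * 3) + x * 3 + 2 < (pd.length : Int) then
        (PySem.List.pyGetD pd (y * (w * 3) + x * 3 + 2) 0,
         PySem.List.pyGetD pd (y * (w * 3) + x * 3 + 1) 0,
         PySem.List.pyGetD pd (y * (w * 3) + x * 3) 0)
      else ((0 : Int), (0 : Int), (0 : Int)))
    = PySem.List.slice (pvPadded pd w h) (some (y * w)) (some (y * w + w)) := by
  by_cases hw : w ≤ 0
  · rw [PySem.List.pyRange_one_eq_nil hw, pv_padded_nil pd w h hw, pv_slice_nil]
    rfl
  · rw [not_le] at hw
    have hh : 0 < h := lt_of_le_of_lt hy0 hyh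
    rw [pv_padded_spec pd w h hw hh]
    have hyww : y * w + w = ((y.toNat * w.toNat + w.toNat : Nat) : Int) := by
      push_cast [Int.toNat_of_nonneg hy0, Int.toNat_of_nonneg (le_of_lt hw)]; ring
    have hyw : y * w = ((y.toNat * w.toNat : Nat) : Int) := by
      push_cast [Int.toNat_of_nonneg hy0, Int.toNat_of_nonneg (le_of_lt hw)]
      ring
    rw [hyww, hyw, PySem.List.slice_natCast, Nat.add_sub_cancel_left]
    have hbound : y.toNat * w.toNat + w.toNat ≤ w.toNat * h.toNat := by
      have h1 : y.toNat + 1 ≤ h.toNat := by omega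
      calc y.toNat * w.toNat + w.toNat = (y.toNat + 1) * w.toNat := by ring
        _ ≤ h.toNat * w.toNat := Nat.mul_le_mul_right _ h1
        _ = w.toNat * h.toNat := Nat.mul_comm _ _
    apply List.ext_getElem
    · simp [PySem.List.length_pyRange_one]
      omega
    · intro i hi1 hi2
      have hiw : i < w.toNat := by
        rw [List.length_map, PySem.List.length_pyRange_one] at hi1; omega
      rw [List.getElem_map, PySem.List.getElem_pyRange_one]
      rw [List.getElem_take, List.getElem_drop, List.getElem_map, List.getElem_range]
      exact pv_cell pd w y i hy0 hw

-- 'if c: out.append(f(x)) else: out.append(g(x))' folded over a list is an append of a map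
lemma pv_foldl_append_ite2 {α β : Type} (p : α → Prop) [DecidablePred p] (f g : α → β) :
    ∀ (l : List α) (acc : List β),
      List.foldl (fun acc x => if p x then acc ++ [f x] else acc ++ [g x]) acc l
        = acc ++ l.map (fun x => if p x then f x else g x) := by
  intro l
  induction l with
  | nil => simp
  | cons a t ih => intro acc; by_cases h : p a <;> simp [h, ih]

-- ===== VERDICT (by name: the statement is the Claim_ definition above) =====
theorem parse_bmp_pixels_py_spec : Claim_equal_parse_bmp_pixels_py := by
  intro pd w h _
  rw [Spec_parse_bmp_pixels_py, parse_bmp_pixels_py, parse_bmp_pixels_py_alt]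
  rw [PySem.List.foldl_append_singleton_eq_map
    (fun y => (PySem.List.pyRange 0 w 1).foldl (fun row x =>
      if y * (w * 3) + x * 3 + 2 < (pd.length : Int) then
        row ++ [(PySem.List.pyGetD pd (y * (w * 3) + x * 3 + 2) 0,
                 PySem.List.pyGetD pd (y * (w * 3) + x * 3 + 1) 0,
                 PySem.List.pyGetD pd (y * (w * 3) + x * 3) 0)]
      else row ++ [((0 : Int), (0 : Int), (0 : Int))]) [])]
  rw [List.nil_append]
  apply List.map_congr_left
  intro y hy
  rw [PySem.List.mem_pyRange_one] at hy
  rw [pv_foldl_append_ite2 (fun x => y * (w * 3) + x * 3 + 2 < (pd.length : Int))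
    (fun x => (PySem.List.pyGetD pd (y * (w * 3) + x * 3 + 2) 0,
               PySem.List.pyGetD pd (y * (w * 3) + x * 3 + 1) 0,
               PySem.List.pyGetD pd (y * (w * 3) + x * 3) 0))
    (fun _ => ((0 : Int), (0 : Int), (0 : Int)))]
  rw [List.nil_append]
  exact pv_row_eq pd w h y hy.1 hy.2
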